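-- pv_equiv track=rewrite | github.com/LLucasVasconcelos/algorithms_python | Graph/generic_search.py | busca_grafo
-- ===== SOURCE A (Python) =====
-- def busca_grafo(grafo, start_node, global_visited):
--     v_t = [start_node]
--     e_t =[]
--     found_new_edge = True
--     while found_new_edge:
--         found_new_edge = False
--         for x in v_t:
--             for edge in grafo.get(x,[]):
--                 y = edge[1]
--                 if y not in v_t:
--                     e_t.append(edge)
--                     v_t.append(y)
--                     global_visited.add(y)
--                     found_new_edge = True
--                     break
--             if found_new_edge:
--                 break
--     return v_t,e_t
-- ===== SOURCE B (Python) =====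
-- def busca_grafo(grafo, start_node, global_visited):
--     # Single-pass traversal: one index pointer over the queue v_t, each
--     # vertex's adjacency list scanned exactly once, with a membership set
--     # (seen == set(v_t) at all times) instead of restarting the scan of
--     # v_t from the front after every accepted edge.
--     v_t = [start_node]
--     e_t = []
--     seen = {start_node}
--     i = 0
--     while i < len(v_t):
--         for edge in grafo.get(v_t[i], []):
--             y = edge[1]
--             if y not in seen:
--                 e_t.append(edge)
--                 v_t.append(y)
--                 seen.add(y)
--                 global_visited.add(y)
--         i += 1
--     return v_t, e_t
-- ===== Notes on version B (the rewrite author's own statement) =====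
-- stated objective: alternative
-- what changed: Replaced the restart-from-scratch search (after every accepted edge A rescans v_t from the front, re-checking membership by list scan) with a single queue pass: one index pointer over v_t, each vertex's adjacency list scanned exactly once, with a membership set kept in sync with v_t.
import Mathlib
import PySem

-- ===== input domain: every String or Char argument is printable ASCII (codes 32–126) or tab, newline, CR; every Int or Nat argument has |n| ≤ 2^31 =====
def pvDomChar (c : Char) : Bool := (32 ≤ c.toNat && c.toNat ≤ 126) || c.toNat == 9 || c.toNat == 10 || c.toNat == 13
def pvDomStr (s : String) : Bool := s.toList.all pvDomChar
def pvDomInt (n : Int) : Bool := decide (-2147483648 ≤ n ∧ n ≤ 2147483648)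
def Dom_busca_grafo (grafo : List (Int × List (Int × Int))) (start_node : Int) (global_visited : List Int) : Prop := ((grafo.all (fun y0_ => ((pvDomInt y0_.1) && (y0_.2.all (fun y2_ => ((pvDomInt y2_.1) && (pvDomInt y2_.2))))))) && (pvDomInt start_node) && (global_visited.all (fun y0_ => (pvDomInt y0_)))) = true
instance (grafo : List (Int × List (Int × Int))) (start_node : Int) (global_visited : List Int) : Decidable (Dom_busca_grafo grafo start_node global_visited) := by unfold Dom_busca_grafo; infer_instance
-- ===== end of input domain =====

-- B replaces A's restart-from-the-front search with a single queue pass (each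
-- vertex's adjacency list scanned once, membership via a set kept in sync with
-- v_t). Both A and B mutate global_visited identically (adding each newly
-- reached vertex); the equivalence proved here is about the return value only.

-- ===== PORT A =====
-- grafo.get(x, []) : first-match lookup in the association list (dict semantics)
def pvAdj (grafo : List (Int × List (Int × Int))) (x : Int) : List (Int × Int) :=
  match grafo.find? (fun p => p.1 == x) with
  | some p => p.2
  | none => []

-- A's two nested for-loops with break: the first edge (scanning v_t in order,
-- each vertex's adjacency in order) whose target is not yet in v_t
def pvFindEdge (grafo : List (Int × List (Int × Int))) : List Int → List Int → Option (Int × Int)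
  | [], _ => none
  | x :: rest, v =>
    match (pvAdj grafo x).find? (fun ed => !(v.contains ed.2)) with
    | some ed => some ed
    | none => pvFindEdge grafo rest v

-- A's while-loop: restart the scan after every accepted edge; fuel bounds the
-- number of iterations (each one adds a vertex that is the target of an edge)
def pvLoopA (grafo : List (Int × List (Int × Int))) : Nat → List Int → List (Int × Int) → List Int × (List (Int × Int))
  | 0, v, e => (v, e)
  | n+1, v, e =>
    match pvFindEdge grafo v v with
    | none => (v, e)
    | some ed => pvLoopA grafo n (v ++ [ed.2]) (e ++ [ed])

def pvEdgeCount (grafo : List (Int × List (Int × Int))) : Nat :=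
  (grafo.map (fun p => p.2.length)).sum

def busca_grafo (grafo : List (Int × List (Int × Int))) (start_node : Int) (global_visited : List Int) : List Int × (List (Int × Int)) :=
  pvLoopA grafo (pvEdgeCount grafo + 1) [start_node] []

-- ===== PORT B =====
-- Source B's inner for-loop over one adjacency list (seen == set(v_t) at all times,
-- so the membership test is on v)
def pvScanAdj : List (Int × Int) → List Int → List (Int × Int) → List Int × (List (Int × Int))
  | [], v, e => (v, e)
  | ed :: rest, v, e =>
    if v.contains ed.2 then pvScanAdj rest v e
    else pvScanAdj rest (v ++ [ed.2]) (e ++ [ed])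

-- Source B's while-loop: index pointer i over the growing queue v_t
def pvLoopB (grafo : List (Int × List (Int × Int))) : Nat → List Int → List (Int × Int) → Nat → List Int × (List (Int × Int))
  | 0, v, e, _ => (v, e)
  | n+1, v, e, i =>
    match v[i]? with
    | none => (v, e)
    | some x =>
      match pvScanAdj (pvAdj grafo x) v e with
      | (v', e') => pvLoopB grafo n v' e' (i+1)

def busca_grafo_alt (grafo : List (Int × List (Int × Int))) (start_node : Int) (global_visited : List Int) : List Int × (List (Int × Int)) :=
  pvLoopB grafo (pvEdgeCount grafo + 1) [start_node] [] 0

-- ===== PRECONDITION & SPEC =====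
def Spec_busca_grafo (grafo : List (Int × List (Int × Int))) (start_node : Int) (global_visited : List Int) (out : List Int × (List (Int × Int))) : Prop := out = busca_grafo_alt grafo start_node global_visited
instance (grafo : List (Int × List (Int × Int))) (start_node : Int) (global_visited : List Int) (out : List Int × (List (Int × Int))) : Decidable (Spec_busca_grafo grafo start_node global_visited out) := by unfold Spec_busca_grafo; infer_instance

-- ===== CLAIM (what is proved, stated in full; the proofs are below) =====
def Claim_equal_busca_grafo : Prop := ∀ (grafo : List (Int × List (Int × Int))) (start_node : Int) (global_visited : List Int), Dom_busca_grafo grafo start_node global_visited → Spec_busca_grafo grafo start_node global_visited (busca_grafo grafo start_node global_visited)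

-- ===== LEMMAS AND PROOFS =====

-- all edge targets reachable through pvAdj
def pvTargets (g : List (Int × List (Int × Int))) : List Int :=
  ((g.map Prod.snd).flatten).map Prod.snd

-- potential: number of distinct edge targets not yet in v
def pvPhi (g : List (Int × List (Int × Int))) (v : List Int) : Nat :=
  ((pvTargets g).dedup.filter (fun y => decide (y ∉ v))).length

-- vertex x has no edge leading outside v
def pvExh (g : List (Int × List (Int × Int))) (x : Int) (v : List Int) : Prop :=
  ∀ ed ∈ pvAdj g x, v.contains ed.2 = true

def pvExhUpto (g : List (Int × List (Int × Int))) (v : List Int) (i : Nat) : Prop :=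
  ∀ j, j < i → ∀ x, v[j]? = some x → pvExh g x v

theorem pvContains_mono {v w : List Int} {a : Int} (h : v <+: w) (hc : v.contains a = true) : w.contains a = true := by
  simp only [List.contains_iff_mem] at *
  exact h.subset hc

theorem pvExh_mono {g : List (Int × List (Int × Int))} {x : Int} {v w : List Int} (h : v <+: w) (he : pvExh g x v) : pvExh g x w :=
  fun ed hed => pvContains_mono h (he ed hed)

theorem pvMem_adj_targets {g : List (Int × List (Int × Int))} {x : Int} {ed : Int × Int} (h : ed ∈ pvAdj g x) : ed.2 ∈ pvTargets g := by
  unfold pvAdj at h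
  rcases hf : g.find? (fun p => p.1 == x) with _ | p
  · rw [hf] at h; simp at h
  · rw [hf] at h
    have hp := List.mem_of_find?_eq_some hf
    simp only [pvTargets, List.mem_map, List.mem_flatten]
    exact ⟨ed, ⟨p.2, ⟨⟨p, hp, rfl⟩, h⟩⟩, rfl⟩

theorem pvFilter_step (y : Int) (v : List Int) (hv : y ∉ v) :
    ∀ l : List Int, l.Nodup → y ∈ l →
    (l.filter (fun z => decide (z ∉ v))).length = (l.filter (fun z => decide (z ∉ v ++ [y]))).length + 1 := by
  intro l
  induction l with
  | nil => simp
  | cons a t ih =>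
    intro hnd hm
    rcases List.nodup_cons.mp hnd with ⟨ha, hndt⟩
    by_cases hay : a = y
    · subst hay
      have htail : ∀ z ∈ t, (decide (z ∉ v)) = (decide (z ∉ v ++ [a])) := by
        intro z hz
        have hzne : z ≠ a := fun h => ha (h ▸ hz)
        simp [List.mem_append, hzne]
      rw [List.filter_cons, List.filter_cons, List.filter_congr htail]
      simp [hv, List.mem_append]
    · have hmt : y ∈ t := by
        rcases List.mem_cons.mp hm with h | h
        · exact absurd h.symm hay
        · exact h
      have hhead : (decide (a ∉ v)) = (decide (a ∉ v ++ [y])) := by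
        simp [List.mem_append, hay]
      by_cases hav : a ∈ v
      · simp [hav, List.mem_append, hay]
        simpa [List.mem_append] using ih hndt hmt
      · simp [hav, List.mem_append, hay]
        simpa [List.mem_append] using ih hndt hmt

theorem pvPhi_step {g : List (Int × List (Int × Int))} {v : List Int} {y : Int}
    (hy : y ∈ pvTargets g) (hv : y ∉ v) :
    pvPhi g v = pvPhi g (v ++ [y]) + 1 :=
  pvFilter_step y v hv (pvTargets g).dedup (List.nodup_dedup _) (List.mem_dedup.mpr hy)

theorem pvFindEdge_skip {g : List (Int × List (Int × Int))} {v : List Int} :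
    ∀ p r : List Int, (∀ x ∈ p, pvExh g x v) → pvFindEdge g (p ++ r) v = pvFindEdge g r v := by
  intro p
  induction p with
  | nil => intro r _; rfl
  | cons x t ih =>
    intro r hp
    have hnone : (pvAdj g x).find? (fun ed => !(v.contains ed.2)) = none := by
      apply List.find?_eq_none.mpr
      intro ed hed
      have hcc := hp x (by simp) ed hed
      simpa using hcc
    simp only [List.cons_append, pvFindEdge, hnone]
    exact ih r (fun z hz => hp z (List.mem_cons_of_mem _ hz))

theorem pvFindEdge_some {g : List (Int × List (Int × Int))} {v : List Int} {ed : Int × Int} :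
    ∀ rem : List Int, pvFindEdge g rem v = some ed → ed.2 ∈ pvTargets g ∧ ed.2 ∉ v := by
  intro rem
  induction rem with
  | nil => intro h; simp [pvFindEdge] at h
  | cons x t ih =>
    intro h
    simp only [pvFindEdge] at h
    rcases hf : (pvAdj g x).find? (fun e => !(v.contains e.2)) with _ | e'
    · rw [hf] at h; exact ih h
    · rw [hf] at h
      cases h
      have hmem := List.mem_of_find?_eq_some hf
      have hpred := List.find?_some hf
      simp only [Bool.not_eq_eq_eq_not, Bool.not_true, List.contains_iff_mem] at hpred
      constructor
      · exact pvMem_adj_targets hmem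
      · simpa using hpred

theorem pvFindEdge_none_of_phi_zero {g : List (Int × List (Int × Int))} {v : List Int}
    (h : pvPhi g v = 0) (rem : List Int) : pvFindEdge g rem v = none := by
  rcases hf : pvFindEdge g rem v with _ | ed
  · rfl
  · exfalso
    rcases pvFindEdge_some rem hf with ⟨ht, hv⟩
    have : ed.2 ∈ (pvTargets g).dedup.filter (fun y => decide (y ∉ v)) := by
      simp [List.mem_filter, List.mem_dedup, ht, hv]
    have := List.length_pos_of_mem this
    unfold pvPhi at h
    omega

theorem pvLoopA_none {g : List (Int × List (Int × Int))} {v : List Int} {e : List (Int × Int)}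
    (h : pvFindEdge g v v = none) : ∀ f, pvLoopA g f v e = (v, e) := by
  intro f; cases f with
  | zero => rfl
  | succ n => simp [pvLoopA, h]

theorem pvLoopA_fuel {g : List (Int × List (Int × Int))} :
    ∀ f₁ f₂ v e, pvPhi g v ≤ f₁ → pvPhi g v ≤ f₂ → pvLoopA g f₁ v e = pvLoopA g f₂ v e := by
  intro f₁
  induction f₁ with
  | zero =>
    intro f₂ v e h1 h2
    have hz : pvPhi g v = 0 := Nat.le_zero.mp h1
    rw [pvLoopA_none (pvFindEdge_none_of_phi_zero hz v) f₂]
    rfl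
  | succ n ih =>
    intro f₂ v e h1 h2
    rcases hf : pvFindEdge g v v with _ | ed
    · rw [pvLoopA_none hf (n+1), pvLoopA_none hf f₂]
    · rcases pvFindEdge_some v hf with ⟨ht, hv⟩
      have hstep := pvPhi_step ht hv
      cases f₂ with
      | zero =>
        exfalso
        have hz : pvPhi g v = 0 := Nat.le_zero.mp h2
        rw [pvFindEdge_none_of_phi_zero hz v] at hf
        simp at hf
      | succ m =>
        simp only [pvLoopA, hf]
        exact ih m (v ++ [ed.2]) (e ++ [ed]) (by omega) (by omega)

-- scanning one adjacency list: the queue only grows, and potential+length is preserved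
theorem pvScanAdj_inv {g : List (Int × List (Int × Int))} :
    ∀ (adj : List (Int × Int)) (v : List Int) (e : List (Int × Int)),
    (∀ ed ∈ adj, ed.2 ∈ pvTargets g) →
    v <+: (pvScanAdj adj v e).1 ∧
    pvPhi g (pvScanAdj adj v e).1 + (pvScanAdj adj v e).1.length = pvPhi g v + v.length := by
  intro adj
  induction adj with
  | nil => intro v e _; exact ⟨List.prefix_refl v, rfl⟩
  | cons ed rest ih =>
    intro v e hadj
    have htl : ∀ e' ∈ rest, e'.2 ∈ pvTargets g := fun e' h => hadj e' (List.mem_cons_of_mem _ h)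
    by_cases hc : v.contains ed.2 = true
    · have hre : pvScanAdj (ed :: rest) v e = pvScanAdj rest v e := by
        simp only [pvScanAdj]; rw [if_pos hc]
      rw [hre]
      exact ih v e htl
    · have hnv : ed.2 ∉ v := by
        simpa using hc
      have hre : pvScanAdj (ed :: rest) v e = pvScanAdj rest (v ++ [ed.2]) (e ++ [ed]) := by
        simp only [pvScanAdj]; rw [if_neg hc]
      rw [hre]
      have hstep := pvPhi_step (hadj ed (by simp)) hnv
      rcases ih (v ++ [ed.2]) (e ++ [ed]) htl with ⟨hp, hinv⟩
      refine ⟨List.IsPrefix.trans (List.prefix_append v [ed.2]) hp, ?_⟩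
      rw [hinv]
      simp [List.length_append]
      omega

theorem pvGetElem?_prefix {v w : List Int} {j : Nat} (h : v <+: w) (hj : j < v.length) :
    w[j]? = v[j]? := by
  rcases h with ⟨t, rfl⟩
  exact List.getElem?_append_left hj

-- the crux: with all vertices before index i exhausted, repeatedly restarting A
-- while vertex v[i]'s adjacency list is scanned consumes exactly that list
theorem pvInner {g : List (Int × List (Int × Int))} {x : Int} {i : Nat} :
    ∀ (adj done : List (Int × Int)) (v : List Int) (e : List (Int × Int)),
    pvAdj g x = done ++ adj →
    (∀ ed ∈ done, v.contains ed.2 = true) →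
    pvExhUpto g v i → v[i]? = some x →
    pvLoopA g (pvPhi g v) v e
      = pvLoopA g (pvPhi g (pvScanAdj adj v e).1) (pvScanAdj adj v e).1 (pvScanAdj adj v e).2
    ∧ v <+: (pvScanAdj adj v e).1
    ∧ pvExh g x (pvScanAdj adj v e).1 := by
  intro adj
  induction adj with
  | nil =>
    intro done v e hsplit hdone _ _
    refine ⟨rfl, List.prefix_refl v, ?_⟩
    intro ed hed
    rw [List.append_nil] at hsplit
    exact hdone ed (hsplit ▸ hed)
  | cons ed rest ih =>
    intro done v e hsplit hdone hupto hvi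
    have hilen : i < v.length := by
      by_contra hh
      rw [List.getElem?_eq_none (by omega)] at hvi
      simp at hvi
    by_cases hc : v.contains ed.2 = true
    · have hsplit' : pvAdj g x = (done ++ [ed]) ++ rest := by
        rw [hsplit, List.append_assoc]; rfl
      have hdone' : ∀ e' ∈ done ++ [ed], v.contains e'.2 = true := by
        intro e' he'
        rcases List.mem_append.mp he' with h | h
        · exact hdone e' h
        · simp at h; subst h; exact hc
      have hre : pvScanAdj (ed :: rest) v e = pvScanAdj rest v e := by
        simp only [pvScanAdj]; rw [if_pos hc]
      rw [hre]
      exact ih (done ++ [ed]) v e hsplit' hdone' hupto hvi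
    · -- ed is exactly the edge A's restarted scan finds
      have hnv : ed.2 ∉ v := by
        simpa using hc
      have hedmem : ed ∈ pvAdj g x := by rw [hsplit]; simp
      have hdecomp : v = v.take i ++ (x :: v.drop (i+1)) := by
        have := List.getElem?_eq_some_iff.mp hvi
        rcases this with ⟨hlt, hx⟩
        rw [← hx]
        rw [← List.drop_eq_getElem_cons hlt, List.take_append_drop]
      have hpref : ∀ z ∈ v.take i, pvExh g z v := by
        intro z hz
        rcases List.mem_iff_getElem?.mp hz with ⟨j, hj⟩
        have hjl := (List.getElem?_eq_some_iff.mp hj).1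
        have hjlt : j < i := by
          have : (v.take i).length ≤ i := by simp
          omega
        have hvj : v[j]? = some z := by
          rw [← hj]
          exact pvGetElem?_prefix (List.take_prefix i v) hjl
        exact hupto j hjlt z hvj
      have hfind : (pvAdj g x).find? (fun e' => !(v.contains e'.2)) = some ed := by
        rw [hsplit, List.find?_append]
        have h1 : done.find? (fun e' => !(v.contains e'.2)) = none := by
          apply List.find?_eq_none.mpr
          intro e' he'
          simpa using hdone e' he'
        rw [h1]
        simp [hnv]
      have hfe : pvFindEdge g v v = some ed := by
        have h1 : pvFindEdge g v v = pvFindEdge g (v.take i ++ (x :: v.drop (i+1))) v := by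
          rw [← hdecomp]
        rw [h1, pvFindEdge_skip (v.take i) (x :: v.drop (i+1)) hpref]
        simp only [pvFindEdge]
        rw [hfind]
      have hstep := pvPhi_step (pvMem_adj_targets hedmem) hnv
      have hloop : pvLoopA g (pvPhi g v) v e
          = pvLoopA g (pvPhi g (v ++ [ed.2])) (v ++ [ed.2]) (e ++ [ed]) := by
        rw [hstep]
        simp [pvLoopA, hfe]
      have hpre1 : v <+: v ++ [ed.2] := List.prefix_append v [ed.2]
      have hsplit' : pvAdj g x = (done ++ [ed]) ++ rest := by
        rw [hsplit, List.append_assoc]; rfl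
      have hdone' : ∀ e' ∈ done ++ [ed], (v ++ [ed.2]).contains e'.2 = true := by
        intro e' he'
        rcases List.mem_append.mp he' with h | h
        · exact pvContains_mono hpre1 (hdone e' h)
        · simp at h; subst h; simp [List.contains_iff_mem]
      have hupto' : pvExhUpto g (v ++ [ed.2]) i := by
        intro j hj x' hx'
        have hvj : (v ++ [ed.2])[j]? = v[j]? := pvGetElem?_prefix hpre1 (by omega)
        exact pvExh_mono hpre1 (hupto j hj x' (hvj ▸ hx'))
      have hvi' : (v ++ [ed.2])[i]? = some x := by
        rw [pvGetElem?_prefix hpre1 hilen]; exact hvi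
      rcases ih (done ++ [ed]) (v ++ [ed.2]) (e ++ [ed]) hsplit' hdone' hupto' hvi' with ⟨h1, h2, h3⟩
      have hscan : pvScanAdj (ed :: rest) v e = pvScanAdj rest (v ++ [ed.2]) (e ++ [ed]) := by
        simp only [pvScanAdj]; rw [if_neg hc]
      rw [hscan]
      exact ⟨hloop.trans h1, hpre1.trans h2, h3⟩

theorem pvLoopB_fuel {g : List (Int × List (Int × Int))} :
    ∀ f₁ f₂ v e i, i ≤ v.length →
    pvPhi g v + (v.length - i) ≤ f₁ → pvPhi g v + (v.length - i) ≤ f₂ →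
    pvLoopB g f₁ v e i = pvLoopB g f₂ v e i := by
  intro f₁
  induction f₁ with
  | zero =>
    intro f₂ v e i hi h1 h2
    have hie : v[i]? = none := List.getElem?_eq_none (by omega)
    cases f₂ with
    | zero => rfl
    | succ m => simp [pvLoopB, hie]
  | succ n ih =>
    intro f₂ v e i hi h1 h2
    rcases hvi : v[i]? with _ | x
    · cases f₂ with
      | zero => simp [pvLoopB, hvi]
      | succ m => simp [pvLoopB, hvi]
    · have hilen : i < v.length := by
        by_contra hh
        rw [List.getElem?_eq_none (by omega)] at hvi
        simp at hvi
      cases f₂ with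
      | zero => omega
      | succ m =>
        simp only [pvLoopB, hvi]
        have hadj : ∀ ed ∈ pvAdj g x, ed.2 ∈ pvTargets g := fun ed h => pvMem_adj_targets h
        rcases pvScanAdj_inv (pvAdj g x) v e hadj with ⟨hp, hinv⟩
        have hlen : v.length ≤ (pvScanAdj (pvAdj g x) v e).1.length := hp.length_le
        exact ih m (pvScanAdj (pvAdj g x) v e).1 (pvScanAdj (pvAdj g x) v e).2 (i+1)
          (by omega) (by omega) (by omega)

theorem pvLoopB_none {g : List (Int × List (Int × Int))} {v : List Int} {e : List (Int × Int)} {i : Nat}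
    (h : v[i]? = none) : ∀ f, pvLoopB g f v e i = (v, e) := by
  intro f; cases f with
  | zero => rfl
  | succ n => simp [pvLoopB, h]

theorem pvMain {g : List (Int × List (Int × Int))} :
    ∀ n v e i, i ≤ v.length → pvExhUpto g v i → pvPhi g v + (v.length - i) ≤ n →
    pvLoopA g (pvPhi g v) v e = pvLoopB g (pvPhi g v + (v.length - i)) v e i := by
  intro n
  induction n with
  | zero =>
    intro v e i hi hupto hn
    have hz : pvPhi g v = 0 := by omega
    have hli : v.length - i = 0 := by omega
    rw [hz, hli]
    rfl
  | succ n ih =>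
    intro v e i hi hupto hn
    rcases hvi : v[i]? with _ | x
    · have hieq : i = v.length := by
        have := List.getElem?_eq_none_iff.mp hvi
        omega
      have hall : ∀ z ∈ v, pvExh g z v := by
        intro z hz
        rcases List.mem_iff_getElem?.mp hz with ⟨j, hj⟩
        have hjl : j < v.length := (List.getElem?_eq_some_iff.mp hj).1
        exact hupto j (by omega) z hj
      have hfe : pvFindEdge g v v = none := by
        have := pvFindEdge_skip v ([] : List Int) hall
        simpa using this
      rw [pvLoopA_none hfe, pvLoopB_none hvi]
    · have hilen : i < v.length := by
        by_contra hh
        rw [List.getElem?_eq_none (by omega)] at hvi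
        simp at hvi
      rcases pvInner (pvAdj g x) [] v e (by simp) (by simp) hupto hvi with ⟨h1, hp, hexh⟩
      have hadj : ∀ ed ∈ pvAdj g x, ed.2 ∈ pvTargets g := fun ed h => pvMem_adj_targets h
      rcases pvScanAdj_inv (pvAdj g x) v e hadj with ⟨_, hinv⟩
      have hlen : v.length ≤ (pvScanAdj (pvAdj g x) v e).1.length := hp.length_le
      set v' := (pvScanAdj (pvAdj g x) v e).1 with hv'
      set e' := (pvScanAdj (pvAdj g x) v e).2 with he'
      have hupto' : pvExhUpto g v' (i+1) := by
        intro j hj x' hx'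
        by_cases hji : j < i
        · have hvj : v'[j]? = v[j]? := pvGetElem?_prefix hp (by omega)
          exact pvExh_mono hp (hupto j hji x' (hvj ▸ hx'))
        · have hje : j = i := by omega
          subst hje
          have hvj : v'[j]? = v[j]? := pvGetElem?_prefix hp hilen
          rw [hvj, hvi] at hx'
          cases hx'
          exact hexh
      -- unfold one step of B
      obtain ⟨k, hk⟩ : ∃ k, pvPhi g v + (v.length - i) = k + 1 := ⟨pvPhi g v + (v.length - i) - 1, by omega⟩
      rw [hk]
      simp only [pvLoopB, hvi]
      have hkeq : k = pvPhi g v' + (v'.length - (i+1)) := by omega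
      rw [h1, hkeq]
      exact ih v' e' (i+1) (by omega) hupto' (by omega)

theorem pvPhi_le_edgeCount (g : List (Int × List (Int × Int))) (v : List Int) :
    pvPhi g v ≤ pvEdgeCount g := by
  unfold pvPhi pvEdgeCount
  have h1 : ((pvTargets g).dedup.filter (fun y => decide (y ∉ v))).length ≤ (pvTargets g).dedup.length :=
    List.length_filter_le _ _
  have h2 : (pvTargets g).dedup.length ≤ (pvTargets g).length :=
    (List.dedup_sublist _).length_le
  have h3 : (pvTargets g).length = (g.map (fun p => p.2.length)).sum := by
    simp [pvTargets, List.length_flatten, Function.comp_def]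
  omega

theorem pvEquiv (g : List (Int × List (Int × Int))) (s : Int) (gv : List Int) :
    busca_grafo g s gv = busca_grafo_alt g s gv := by
  unfold busca_grafo busca_grafo_alt
  have hphi := pvPhi_le_edgeCount g [s]
  rw [pvLoopA_fuel (pvEdgeCount g + 1) (pvPhi g [s]) [s] [] (by omega) (by omega)]
  have hmain := pvMain (g := g) (pvPhi g [s] + 1) [s] [] 0
    (by simp) (by intro j hj x hx; omega) (by simp)
  simp only [List.length_cons, List.length_nil, Nat.sub_zero] at hmain
  rw [hmain]
  exact pvLoopB_fuel (pvPhi g [s] + (1 - 0)) (pvEdgeCount g + 1) [s] [] 0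
    (by simp) (by simp) (by simp; omega)

-- ===== VERDICT (by name: the statement is the Claim_ definition above) =====
theorem busca_grafo_spec : Claim_equal_busca_grafo := by
  intro g s gv _
  unfold Spec_busca_grafo
  exact pvEquiv g s gv
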